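-- pv_equiv track=rewrite | github.com/noizu-labs-ml/NoizuPromptLingo | core/lib/npl_persona/parsers.py | remove_table_row
-- ===== SOURCE A (Python) =====
-- from typing import Dict, List, Optional, Tuple
--
-- def remove_table_row(content: str, pattern: str) -> Tuple[str, bool]:
--     """
--     Remove a table row matching a pattern.
--
--     Args:
--         content: Full content
--         pattern: Pattern to find in the row to remove
--
--     Returns:
--         Tuple of (modified content, was_removed)
--     """
--     lines = content.split("\n")
--     new_lines = []
--     removed = False
--
--     for line in lines:
--         if pattern in line and line.strip().startswith("|") and not removed:
--             removed = True
--             continue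
--         new_lines.append(line)
--
--     return "\n".join(new_lines), removed
-- ===== SOURCE B (Python) =====
-- def remove_table_row(content: str, pattern: str):
--     """Remove the first table row matching a pattern: locate its index, then splice it out."""
--     lines = content.split("\n")
--     idx = next((i for i, line in enumerate(lines)
--                 if pattern in line and line.strip().startswith("|")), None)
--     if idx is None:
--         return content, False
--     return "\n".join(lines[:idx] + lines[idx + 1:]), True
-- ===== Notes on version B (the rewrite author's own statement) =====
-- stated objective: simpler
-- what changed: B locates the index of the first matching table row with next(enumerate(...)) and splices it out of the line list (returning content unchanged when there is no match), instead of A's single filtering loop that copies every line and threads a 'removed' flag.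
import Mathlib
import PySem

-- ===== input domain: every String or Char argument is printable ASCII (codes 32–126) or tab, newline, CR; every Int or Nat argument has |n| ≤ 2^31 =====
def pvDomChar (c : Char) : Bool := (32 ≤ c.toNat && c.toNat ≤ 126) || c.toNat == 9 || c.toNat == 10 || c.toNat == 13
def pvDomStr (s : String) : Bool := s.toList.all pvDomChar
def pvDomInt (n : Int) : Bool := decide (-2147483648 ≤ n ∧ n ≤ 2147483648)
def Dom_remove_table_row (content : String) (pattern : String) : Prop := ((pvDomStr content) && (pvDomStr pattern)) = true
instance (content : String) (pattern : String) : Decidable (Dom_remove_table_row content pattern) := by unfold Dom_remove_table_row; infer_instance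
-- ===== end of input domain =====

-- B replaces A's filtering loop with a 'removed' flag by a locate-then-splice decomposition (simpler; same return value, same cost).

-- ===== PORT A =====
-- for line in lines: if pattern in line and line.strip().startswith("|") and not removed: … else append
def remove_table_row (content : String) (pattern : String) : String × Bool :=
  let lines := (PySem.Str.split? content "\n").getD []
  let st := lines.foldl
    (fun (st : List String × Bool) line =>
      if (PySem.Str.isIn pattern line && PySem.Str.startswith (PySem.Str.strip line) "|") && !st.2
      then (st.1, true)
      else (st.1 ++ [line], st.2))
    ([], false)
  (PySem.Str.join "\n" st.1, st.2)

-- ===== PORT B =====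
-- idx = next((i for i, line in enumerate(lines) if …), None); splice lines[:idx] + lines[idx+1:]
def remove_table_row_alt (content : String) (pattern : String) : String × Bool :=
  let lines := (PySem.Str.split? content "\n").getD []
  match lines.findIdx? (fun line => PySem.Str.isIn pattern line && PySem.Str.startswith (PySem.Str.strip line) "|") with
  | none => (content, false)
  | some i => (PySem.Str.join "\n" (lines.take i ++ lines.drop (i + 1)), true)

-- ===== PRECONDITION & SPEC =====
def Spec_remove_table_row (content : String) (pattern : String) (out : String × Bool) : Prop := out = remove_table_row_alt content pattern
instance (content : String) (pattern : String) (out : String × Bool) : Decidable (Spec_remove_table_row content pattern out) := by unfold Spec_remove_table_row; infer_instance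

-- ===== CLAIM (what is proved, stated in full; the proofs are below) =====
def Claim_equal_remove_table_row : Prop := ∀ (content : String) (pattern : String), Dom_remove_table_row content pattern → Spec_remove_table_row content pattern (remove_table_row content pattern)

-- ===== LEMMAS AND PROOFS =====

-- A's loop once the flag is set: it just copies the rest.
theorem pv_fold_true (p : String → Bool) (ls acc : List String) :
    ls.foldl (fun (st : List String × Bool) line =>
        if p line && !st.2 then (st.1, true) else (st.1 ++ [line], st.2)) (acc, true)
      = (acc ++ ls, true) := by
  induction ls generalizing acc with
  | nil => simp
  | cons x xs ih =>
    simp only [List.foldl_cons, Bool.not_true, Bool.and_false, Bool.false_eq_true, if_false]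
    rw [ih]
    simp

-- A's loop when no line matches: it copies everything, flag stays false.
theorem pv_fold_none (p : String → Bool) (ls : List String) (h : ls.findIdx? p = none) (acc : List String) :
    ls.foldl (fun (st : List String × Bool) line =>
        if p line && !st.2 then (st.1, true) else (st.1 ++ [line], st.2)) (acc, false)
      = (acc ++ ls, false) := by
  induction ls generalizing acc with
  | nil => simp
  | cons x xs ih =>
    rw [List.findIdx?_cons] at h
    have hx : p x = false := by
      cases hc : p x with
      | false => rfl
      | true => rw [hc] at h; simp at h
    rw [hx] at h
    simp only [Bool.false_eq_true, if_false, Option.map_eq_none_iff] at h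
    simp only [List.foldl_cons, hx, Bool.false_and, Bool.false_eq_true, if_false]
    rw [ih h]
    simp

-- A's loop when the first match is at index i: it drops exactly that line.
theorem pv_fold_some (p : String → Bool) (ls : List String) (i : Nat)
    (h : ls.findIdx? p = some i) (acc : List String) :
    ls.foldl (fun (st : List String × Bool) line =>
        if p line && !st.2 then (st.1, true) else (st.1 ++ [line], st.2)) (acc, false)
      = (acc ++ ls.take i ++ ls.drop (i + 1), true) := by
  induction ls generalizing acc i with
  | nil => simp at h
  | cons x xs ih =>
    rw [List.findIdx?_cons] at h
    cases hx : p x with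
    | true =>
      rw [hx, if_pos rfl] at h
      injection h with h
      subst h
      simp only [List.foldl_cons, hx, Bool.not_false, Bool.true_and, if_pos]
      rw [pv_fold_true]
      simp
    | false =>
      rw [hx] at h
      simp only [Bool.false_eq_true, if_false] at h
      cases hj : xs.findIdx? p with
      | none => rw [hj] at h; simp at h
      | some j =>
        rw [hj] at h
        simp only [Option.map_some, Option.some.injEq] at h
        subst h
        simp only [List.foldl_cons, hx, Bool.false_and, Bool.false_eq_true, if_false]
        rw [ih j hj]
        simp [List.take_succ_cons, List.drop_succ_cons]

-- splitOn.go: the accumulator is prepended (reversed) to the result.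
theorem pv_go_acc (sep : List Char) (fuel : Nat) (l cur : List Char) (acc : List (List Char)) :
    PySem.Chars.splitOn.go sep fuel l cur acc
      = acc.reverse ++ PySem.Chars.splitOn.go sep fuel l cur [] := by
  induction fuel generalizing l cur acc with
  | zero => simp [PySem.Chars.splitOn.go]
  | succ n ih =>
    cases l with
    | nil => simp [PySem.Chars.splitOn.go]
    | cons c rest =>
      simp only [PySem.Chars.splitOn.go]
      by_cases hp : sep.isPrefixOf (c :: rest) = true
      · rw [if_pos hp, if_pos hp]
        rw [ih _ _ ([cur.reverse]), ih _ _ (cur.reverse :: acc)]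
        simp
      · rw [if_neg hp, if_neg hp]
        exact ih _ _ _

-- splitOn.go never returns the empty list.
theorem pv_go_ne_nil (sep : List Char) (fuel : Nat) (l cur : List Char) (acc : List (List Char)) :
    PySem.Chars.splitOn.go sep fuel l cur acc ≠ [] := by
  induction fuel generalizing l cur acc with
  | zero => simp [PySem.Chars.splitOn.go]
  | succ n ih =>
    cases l with
    | nil => simp [PySem.Chars.splitOn.go]
    | cons c rest =>
      simp only [PySem.Chars.splitOn.go]
      by_cases hp : sep.isPrefixOf (c :: rest) = true
      · rw [if_pos hp]; exact ih _ _ _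
      · rw [if_neg hp]; exact ih _ _ _

-- join sep ∘ splitOn.go reconstructs the remaining input (with enough fuel).
theorem pv_join_go (sep : List Char) (hsep : sep ≠ []) (fuel : Nat) (l cur : List Char)
    (hf : l.length ≤ fuel) :
    PySem.Chars.join sep (PySem.Chars.splitOn.go sep fuel l cur []) = cur.reverse ++ l := by
  induction fuel generalizing l cur with
  | zero =>
    have : l = [] := List.eq_nil_of_length_eq_zero (Nat.le_zero.mp hf)
    subst this
    simp [PySem.Chars.splitOn.go, PySem.Chars.join, List.intercalate]
  | succ n ih =>
    cases l with
    | nil => simp [PySem.Chars.splitOn.go, PySem.Chars.join, List.intercalate]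
    | cons c rest =>
      simp only [PySem.Chars.splitOn.go]
      by_cases hp : sep.isPrefixOf (c :: rest) = true
      · rw [if_pos hp]
        rw [pv_go_acc]
        have hpre : sep <+: (c :: rest) := List.isPrefixOf_iff_prefix.mp hp
        have hdroplen : ((c :: rest).drop sep.length).length ≤ n := by
          have h1 : 1 ≤ sep.length := by
            cases sep with
            | nil => exact absurd rfl hsep
            | cons _ _ => simp
          simp only [List.length_drop]
          omega
        have hrec := ih ((c :: rest).drop sep.length) [] hdroplen
        cases hgo : PySem.Chars.splitOn.go sep n ((c :: rest).drop sep.length) [] [] with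
        | nil => exact absurd hgo (pv_go_ne_nil sep n _ [] [])
        | cons q t =>
          rw [hgo] at hrec
          simp only [List.reverse_cons, List.reverse_nil, List.nil_append, List.singleton_append]
          rw [PySem.Chars.join_cons_cons, hrec]
          have : sep ++ (c :: rest).drop sep.length = c :: rest := by
            obtain ⟨suf, hsuf⟩ := hpre
            have : (c :: rest).drop sep.length = suf := by
              rw [← hsuf]; simp
            rw [this, hsuf]
          simp only [List.reverse_nil, List.nil_append] at this ⊢
          rw [List.append_assoc, this]
      · rw [if_neg hp]
        have : rest.length ≤ n := by
          simp only [List.length_cons] at hf; omega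
        rw [ih rest (c :: cur) this]
        simp

-- '\n'.join(content.split('\n')) == content.
theorem pv_roundtrip (content : String) :
    PySem.Str.join "\n" ((PySem.Str.split? content "\n").getD []) = content := by
  simp only [PySem.Str.split?, PySem.Chars.split?, PySem.Str.join]
  simp only [show ("\n" : String).toList = ['\n'] from rfl]
  simp only [List.isEmpty_cons, if_false, Option.map_some, Option.getD_some, Bool.false_eq_true]
  rw [List.map_map]
  have hmap : (List.map (String.toList ∘ String.ofList)
      (PySem.Chars.splitOn content.toList ['\n'])) = PySem.Chars.splitOn content.toList ['\n'] := by
    apply List.map_id''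
    intro cs
    simp [String.toList_ofList]
  rw [hmap]
  have := pv_join_go ['\n'] (by simp) (content.toList.length + 1) content.toList []
    (Nat.le_succ _)
  rw [show PySem.Chars.splitOn content.toList ['\n']
        = PySem.Chars.splitOn.go ['\n'] (content.toList.length + 1) content.toList [] [] from rfl]
  rw [this]
  simp

-- ===== VERDICT (by name: the statement is the Claim_ definition above) =====
theorem remove_table_row_spec : Claim_equal_remove_table_row := by
  intro content pattern _
  unfold Spec_remove_table_row remove_table_row remove_table_row_alt
  set p : String → Bool :=
    fun line => PySem.Str.isIn pattern line && PySem.Str.startswith (PySem.Str.strip line) "|" with hp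
  set ls : List String := (PySem.Str.split? content "\n").getD [] with hls
  cases hidx : ls.findIdx? p with
  | none =>
    simp only [hidx]
    rw [show (fun (st : List String × Bool) line =>
          if (PySem.Str.isIn pattern line && PySem.Str.startswith (PySem.Str.strip line) "|") && !st.2
          then (st.1, true) else (st.1 ++ [line], st.2))
        = (fun (st : List String × Bool) line =>
          if p line && !st.2 then (st.1, true) else (st.1 ++ [line], st.2)) from rfl]
    rw [pv_fold_none p ls hidx []]
    simp only [List.nil_append]
    rw [hls, pv_roundtrip]
  | some i =>
    simp only [hidx]
    rw [show (fun (st : List String × Bool) line =>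
          if (PySem.Str.isIn pattern line && PySem.Str.startswith (PySem.Str.strip line) "|") && !st.2
          then (st.1, true) else (st.1 ++ [line], st.2))
        = (fun (st : List String × Bool) line =>
          if p line && !st.2 then (st.1, true) else (st.1 ++ [line], st.2)) from rfl]
    rw [pv_fold_some p ls i hidx []]
    simp
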